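-- pv_equiv track=rewrite | github.com/gerardPerello/advent-of-code | 2023/Day1/day12.py | find_first_num
-- ===== SOURCE A (Python) =====
-- def find_first_num(line, mapping, reverse_key):
--     best = None
--     best_idx = len(line)
--
--     for search, d in mapping.items():
--         if reverse_key:
--             search = search[::-1]
--         if search in line:
--             idx = line.index(search)
--             if idx < best_idx:
--                 best_idx = idx
--                 best = d
--
--     return best
-- ===== SOURCE B (Python) =====
-- def find_first_num(line, mapping, reverse_key):
--     items = [((k[::-1] if reverse_key else k), d) for k, d in mapping.items()]
--     for i in range(len(line)):
--         for s, d in items: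
--             if line.startswith(s, i):
--                 return d
--     return None
-- ===== Notes on version B (the rewrite author's own statement) =====
-- stated objective: alternative
-- what changed: Replaces A's key-outer loop (compute each key's first index over the whole line, keep the running minimum) with a single left-to-right position scan that short-circuits at the earliest match of any (pre-reversed) key.
import Mathlib
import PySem

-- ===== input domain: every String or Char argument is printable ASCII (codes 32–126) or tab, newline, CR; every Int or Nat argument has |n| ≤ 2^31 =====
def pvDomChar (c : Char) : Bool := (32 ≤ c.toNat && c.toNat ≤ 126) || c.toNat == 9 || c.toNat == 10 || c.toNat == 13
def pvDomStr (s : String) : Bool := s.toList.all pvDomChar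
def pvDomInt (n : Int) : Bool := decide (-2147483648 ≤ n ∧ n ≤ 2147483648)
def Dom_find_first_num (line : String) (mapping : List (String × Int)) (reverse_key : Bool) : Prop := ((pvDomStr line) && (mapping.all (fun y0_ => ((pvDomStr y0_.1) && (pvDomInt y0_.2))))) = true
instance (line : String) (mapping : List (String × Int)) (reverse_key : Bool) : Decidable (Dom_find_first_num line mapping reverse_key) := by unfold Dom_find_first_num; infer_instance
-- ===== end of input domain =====

-- B replaces A's key-outer minimum-of-first-indices loop with a left-to-right scan over
-- positions that short-circuits at the earliest match (objective: alternative decomposition).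

-- ===== PORT A =====
-- A: for each (search, d) in mapping (reversing search when reverse_key), if search occurs
-- in line take its first index ('search in line' = Chars.isIn, 'line.index' = Chars.find,
-- guarded so it never raises; 'search[::-1]' is reversal, PySem.List.slice?_none_none_neg_one)
-- and keep the value with the strictly smallest index.
def find_first_num (line : String) (mapping : List (String × Int)) (reverse_key : Bool) : Option Int :=
  (mapping.foldl
      (fun (st : Option Int × Int) kd =>
        let search := if reverse_key then kd.1.toList.reverse else kd.1.toList
        if PySem.Chars.isIn search line.toList then
          let idx := PySem.Chars.find line.toList search
          if idx < st.2 then (some kd.2, idx) else st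
        else st)
      (none, (line.toList.length : Int))).1

-- ===== PORT B =====
-- B: the pre-reversed items list ('[(k[::-1] if reverse_key else k, d) for k, d in …]').
def ffnItems (mapping : List (String × Int)) (reverse_key : Bool) : List (List Char × Int) :=
  mapping.map (fun kd => (if reverse_key then kd.1.toList.reverse else kd.1.toList, kd.2))

-- B's outer loop over positions i = 0 .. len(line)-1 (the successive nonempty tails);
-- the inner 'for s, d in items: if line.startswith(s, i): return d' is the first-match search.
def ffnScan (items : List (List Char × Int)) : List Char → Option Int
  | [] => none
  | c :: rest =>
    match items.find? (fun sd => sd.1.isPrefixOf (c :: rest)) with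
    | some sd => some sd.2
    | none => ffnScan items rest

def find_first_num_alt (line : String) (mapping : List (String × Int)) (reverse_key : Bool) : Option Int :=
  ffnScan (ffnItems mapping reverse_key) line.toList

-- ===== PRECONDITION & SPEC =====
def Spec_find_first_num (line : String) (mapping : List (String × Int)) (reverse_key : Bool) (out : Option Int) : Prop := out = find_first_num_alt line mapping reverse_key
instance (line : String) (mapping : List (String × Int)) (reverse_key : Bool) (out : Option Int) : Decidable (Spec_find_first_num line mapping reverse_key out) := by unfold Spec_find_first_num; infer_instance

-- ===== CLAIM (what is proved, stated in full; the proofs are below) =====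
def Claim_equal_find_first_num : Prop := ∀ (line : String) (mapping : List (String × Int)) (reverse_key : Bool), Dom_find_first_num line mapping reverse_key → Spec_find_first_num line mapping reverse_key (find_first_num line mapping reverse_key)

-- ===== LEMMAS AND PROOFS =====

-- Proof-side notion: the (index, value) pair A's loop converges to — first item achieving
-- the minimal first-occurrence index in cs (head wins ties).
def ffnBest? (cs : List Char) : List (List Char × Int) → Option (Int × Int)
  | [] => none
  | sd :: rest =>
    let i := PySem.Chars.find cs sd.1
    if i = -1 then ffnBest? cs rest
    else
      match ffnBest? cs rest with
      | none => some (i, sd.2)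
      | some (j, e) => if j < i then some (j, e) else some (i, sd.2)

theorem ffnBest?_bounds (cs : List Char) (items : List (List Char × Int)) :
    ∀ i d, ffnBest? cs items = some (i, d) → 0 ≤ i ∧ i ≤ cs.length := by
  induction items with
  | nil => intro i d h; simp [ffnBest?] at h
  | cons sd rest ih =>
    intro i d h
    simp only [ffnBest?] at h
    have hlb := PySem.Chars.neg_one_le_find cs sd.1
    have hub := PySem.Chars.find_le_length cs sd.1
    split at h
    · exact ih i d h
    · cases hrest : ffnBest? cs rest with
      | none => rw [hrest] at h; simp at h; omega
      | some je =>
        obtain ⟨j, e⟩ := je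
        rw [hrest] at h
        have := ih j e hrest
        simp only at h
        split at h <;> (simp at h; omega)

theorem ffnFold_eq (cs : List Char) (items : List (List Char × Int))
    (b : Option Int) (bi : Int) :
    items.foldl
      (fun (st : Option Int × Int) sd =>
        if PySem.Chars.isIn sd.1 cs then
          let idx := PySem.Chars.find cs sd.1
          if idx < st.2 then (some sd.2, idx) else st
        else st)
      (b, bi)
    = match ffnBest? cs items with
      | none => (b, bi)
      | some (i, d) => if i < bi then (some d, i) else (b, bi) := by
  induction items generalizing b bi with
  | nil => simp [ffnBest?]
  | cons sd rest ih =>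
    simp only [List.foldl_cons, ffnBest?]
    have hiff : PySem.Chars.isIn sd.1 cs = true ↔ PySem.Chars.find cs sd.1 ≠ -1 :=
      (PySem.Chars.isIn_iff_infix sd.1 cs).trans (PySem.Chars.find_ne_neg_one_iff cs sd.1).symm
    by_cases hin : PySem.Chars.isIn sd.1 cs = true
    · have hne : PySem.Chars.find cs sd.1 ≠ -1 := hiff.mp hin
      simp only [hin, if_true, if_neg (by simpa using hne)]
      set i := PySem.Chars.find cs sd.1 with hi
      by_cases hlt : i < bi
      · simp only [if_pos hlt]
        rw [ih]
        cases hrest : ffnBest? cs rest with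
        | none => simp [hlt]
        | some je =>
          obtain ⟨j, e⟩ := je
          simp only
          split_ifs <;> simp_all <;> omega
      · simp only [if_neg hlt]
        rw [ih]
        cases hrest : ffnBest? cs rest with
        | none => simp [hlt]
        | some je =>
          obtain ⟨j, e⟩ := je
          simp only
          split_ifs <;> simp_all <;> omega
    · have hne : PySem.Chars.find cs sd.1 = -1 := by
        by_contra h; exact hin (hiff.mpr h)
      simp only [Bool.not_eq_true] at hin
      simp [hin, hne, ih]

-- find = k when there is an occurrence at k and none earlier.
theorem ffnFind_eq_of (cs sub : List Char) (k : Nat)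
    (hk : sub <+: cs.drop k) (hmin : ∀ i < k, ¬ sub <+: cs.drop i) :
    PySem.Chars.find cs sub = (k : Int) := by
  have hinf : sub <:+: cs := by
    rw [← PySem.Chars.isIn_iff_infix, ← PySem.Chars.exists_prefix_drop_iff_isIn]
    exact ⟨k, hk⟩
  have hpos : 0 ≤ PySem.Chars.find cs sub :=
    (PySem.Chars.find_nonneg_iff cs sub).mpr hinf
  have hspec := PySem.Chars.find_spec (s := cs) (sub := sub) hpos
  rcases lt_trichotomy (PySem.Chars.find cs sub).toNat k with h | h | h
  · exact absurd hspec.1 (hmin _ h)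
  · omega
  · exact absurd hk (hspec.2 k h)

theorem ffnFind_of_prefix (cs sub : List Char) (h : sub <+: cs) :
    PySem.Chars.find cs sub = 0 := by
  simpa using ffnFind_eq_of cs sub 0 (by simpa using h) (by omega)

-- When some item prefixes cs, the best is the first such item, at index 0.
theorem ffnBest?_of_find?_some (cs : List Char) (items : List (List Char × Int))
    (sd0 : List Char × Int)
    (h : items.find? (fun sd => sd.1.isPrefixOf cs) = some sd0) :
    ffnBest? cs items = some (0, sd0.2) := by
  induction items with
  | nil => simp at h
  | cons sd rest ih =>
    by_cases hp : sd.1.isPrefixOf cs = true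
    · rw [List.find?_cons_of_pos (by simpa using hp)] at h
      obtain rfl : sd = sd0 := by injection h
      have h0 : PySem.Chars.find cs sd.1 = 0 :=
        ffnFind_of_prefix cs sd.1 (List.isPrefixOf_iff_prefix.mp hp)
      simp only [ffnBest?, h0]
      rw [if_neg (by norm_num)]
      cases hrest : ffnBest? cs rest with
      | none => rfl
      | some je =>
        obtain ⟨j, e⟩ := je
        have hb := ffnBest?_bounds cs rest j e hrest
        simp only
        rw [if_neg (by omega)]
    · rw [List.find?_cons_of_neg (by simpa using hp)] at h
      have hnp : ¬ sd.1 <+: cs := fun hc => hp (List.isPrefixOf_iff_prefix.mpr hc)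
      have hne0 : PySem.Chars.find cs sd.1 ≠ 0 := by
        intro h0
        have hpos : 0 ≤ PySem.Chars.find cs sd.1 := by omega
        have := (PySem.Chars.find_spec (s := cs) (sub := sd.1) hpos).1
        rw [h0] at this
        simp at this
        exact hnp this
      simp only [ffnBest?, ih h]
      by_cases h1 : PySem.Chars.find cs sd.1 = -1
      · rw [if_pos h1]
      · rw [if_neg h1]
        have hlb := PySem.Chars.neg_one_le_find cs sd.1
        rw [if_pos (by omega)]

-- When no item prefixes c :: rest, every first occurrence shifts right by one.
theorem ffnFind_shift (c : Char) (rest sub : List Char) (h : ¬ sub <+: c :: rest) :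
    PySem.Chars.find (c :: rest) sub =
      (if PySem.Chars.find rest sub = -1 then -1 else PySem.Chars.find rest sub + 1) := by
  by_cases hr : PySem.Chars.find rest sub = -1
  · rw [if_pos hr]
    rw [PySem.Chars.find_eq_neg_one_iff] at hr ⊢
    intro hinf
    rw [← PySem.Chars.isIn_iff_infix, ← PySem.Chars.exists_prefix_drop_iff_isIn] at hinf
    obtain ⟨j, hj⟩ := hinf
    cases j with
    | zero => exact h (by simpa using hj)
    | succ m =>
      exact hr (by
        rw [← PySem.Chars.isIn_iff_infix, ← PySem.Chars.exists_prefix_drop_iff_isIn]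
        exact ⟨m, by simpa using hj⟩)
  · rw [if_neg hr]
    have hpos : 0 ≤ PySem.Chars.find rest sub := by
      have := PySem.Chars.neg_one_le_find rest sub; omega
    have hspec := PySem.Chars.find_spec (s := rest) (sub := sub) hpos
    set k := (PySem.Chars.find rest sub).toNat with hkdef
    have : PySem.Chars.find (c :: rest) sub = ((k + 1 : Nat) : Int) := by
      apply ffnFind_eq_of
      · simpa using hspec.1
      · intro i hi
        cases i with
        | zero => simpa using h
        | succ m => simpa using hspec.2 m (by omega)
    rw [this]; push_cast; omega

theorem ffnBest?_shift (c : Char) (rest : List Char) (items : List (List Char × Int))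
    (h : ∀ sd ∈ items, ¬ sd.1 <+: c :: rest) :
    ffnBest? (c :: rest) items = (ffnBest? rest items).map (fun p => (p.1 + 1, p.2)) := by
  induction items with
  | nil => simp [ffnBest?]
  | cons sd tl ih =>
    have hhd := h sd (by simp)
    have htl : ∀ x ∈ tl, ¬ x.1 <+: c :: rest := fun x hx => h x (by simp [hx])
    simp only [ffnBest?, ffnFind_shift c rest sd.1 hhd, ih htl]
    by_cases hr : PySem.Chars.find rest sd.1 = -1
    · simp [hr]
    · have hlb := PySem.Chars.neg_one_le_find rest sd.1
      have hne' : PySem.Chars.find rest sd.1 + 1 ≠ -1 := by omega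
      simp only [if_neg hr, if_neg hne']
      cases htl' : ffnBest? rest tl with
      | none => simp
      | some je =>
        obtain ⟨j, e⟩ := je
        simp only [Option.map_some]
        split_ifs <;> simp_all <;> omega

-- B equals the best-characterization, thresholded at the length.
theorem ffnScan_eq (items : List (List Char × Int)) (cs : List Char) :
    ffnScan items cs =
      match ffnBest? cs items with
      | none => none
      | some (i, d) => if i < (cs.length : Int) then some d else none := by
  induction cs with
  | nil =>
    cases hb : ffnBest? [] items with
    | none => simp [ffnScan]
    | some idp =>
      obtain ⟨i, d⟩ := idp
      have := ffnBest?_bounds [] items i d hb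
      simp only [ffnScan]
      rw [if_neg (by simp at this ⊢; omega)]
  | cons c rest ih =>
    simp only [ffnScan]
    cases hf : items.find? (fun sd => sd.1.isPrefixOf (c :: rest)) with
    | some sd0 =>
      rw [ffnBest?_of_find?_some (c :: rest) items sd0 hf]
      simp only
      rw [if_pos (by simp)]
    | none =>
      have hnone : ∀ x ∈ items, ¬ x.1 <+: c :: rest := by
        intro x hx
        have := List.find?_eq_none.mp hf x hx
        simpa [List.isPrefixOf_iff_prefix] using this
      rw [ffnBest?_shift c rest items hnone, ih]
      cases hb : ffnBest? rest items with
      | none => simp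
      | some idp =>
        obtain ⟨i, d⟩ := idp
        simp only [Option.map_some]
        by_cases hlt : i < (rest.length : Int)
        · rw [if_pos hlt, if_pos (by push_cast [List.length_cons]; omega)]
        · rw [if_neg hlt, if_neg (by push_cast [List.length_cons]; omega)]

-- ===== VERDICT (by name: the statement is the Claim_ definition above) =====
theorem find_first_num_spec : Claim_equal_find_first_num := by
  intro line mapping reverse_key _
  unfold Spec_find_first_num find_first_num_alt
  have hA : find_first_num line mapping reverse_key =
      ((ffnItems mapping reverse_key).foldl
        (fun (st : Option Int × Int) sd =>
          if PySem.Chars.isIn sd.1 line.toList then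
            let idx := PySem.Chars.find line.toList sd.1
            if idx < st.2 then (some sd.2, idx) else st
          else st)
        (none, (line.toList.length : Int))).1 := by
    simp only [find_first_num, ffnItems, List.foldl_map]
  rw [hA, ffnFold_eq, ffnScan_eq]
  cases hb : ffnBest? line.toList (ffnItems mapping reverse_key) with
  | none => rfl
  | some idp =>
    obtain ⟨i, d⟩ := idp
    simp only
    by_cases hlt : i < (line.toList.length : Int)
    · rw [if_pos hlt, if_pos hlt]
    · rw [if_neg hlt, if_neg hlt]
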